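-- pv_equiv track=rewrite | github.com/johnlyzhou/decision-making | src/utils.py | get_block_indices
-- ===== SOURCE A (Python) =====
-- from typing import List, Tuple
--
-- def get_block_indices(blocks: List[Tuple[str, float, int]]) -> List[Tuple[int, int]]:
--     """Return list of indices of the first and last trials of each block within all trials of the experiment."""
--     indices = []
--     trial_idx = 0
--     for i in range(len(blocks)):
--         start = trial_idx
--         end = trial_idx + blocks[i][2]
--         indices.append((start, end))
--         trial_idx = end
--     return indices
-- ===== SOURCE B (Python) =====
-- from typing import List, Tuple
--
-- def get_block_indices(blocks: List[Tuple[str, float, int]]) -> List[Tuple[int, int]]: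
--     """Walk the blocks back-to-front: start from the grand total of trial counts
--     and peel each block's count off the end, emitting (total - n, total)."""
--     total = sum(b[2] for b in blocks)
--     out = []
--     for b in reversed(blocks):
--         n = b[2]
--         out.append((total - n, total))
--         total -= n
--     out.reverse()
--     return out
-- ===== Notes on version B (the rewrite author's own statement) =====
-- stated objective: alternative
-- what changed: B builds the result back-to-front: it computes the grand total of trial counts once, then iterates the blocks in reverse maintaining a shrinking remaining-total and emitting (total - n, total), reversing the collected list at the end, instead of A's forward loop with a growing running offset.
import Mathlib
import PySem

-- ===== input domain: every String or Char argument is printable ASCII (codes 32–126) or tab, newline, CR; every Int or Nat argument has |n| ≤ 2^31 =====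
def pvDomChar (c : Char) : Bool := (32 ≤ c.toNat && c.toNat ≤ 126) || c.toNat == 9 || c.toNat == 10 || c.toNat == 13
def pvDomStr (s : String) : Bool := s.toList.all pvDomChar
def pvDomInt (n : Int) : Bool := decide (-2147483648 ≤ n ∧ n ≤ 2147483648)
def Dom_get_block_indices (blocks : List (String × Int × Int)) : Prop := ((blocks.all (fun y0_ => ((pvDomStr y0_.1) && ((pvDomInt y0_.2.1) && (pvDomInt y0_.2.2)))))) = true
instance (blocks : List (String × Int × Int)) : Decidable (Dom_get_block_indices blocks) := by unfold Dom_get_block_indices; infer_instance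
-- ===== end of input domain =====

-- B builds the result back-to-front from a shrinking remaining-total instead of A's
-- forward loop with a growing offset; same cost, different traversal order.

-- ===== PORT A =====
-- the for-loop over i in range(len(blocks)) visits the blocks in order with a running trial_idx
def get_block_indices_go (blocks : List (String × Int × Int)) (trial_idx : Int) : List (Int × Int) :=
  match blocks with
  | [] => []
  | b :: rest => (trial_idx, trial_idx + b.2.2) :: get_block_indices_go rest (trial_idx + b.2.2)

def get_block_indices (blocks : List (String × Int × Int)) : List (Int × Int) :=
  get_block_indices_go blocks 0

-- ===== PORT B =====
-- one step of B's loop body: append (total - n, total), then total -= n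
def get_block_indices_alt_step (st : Int × List (Int × Int)) (b : String × Int × Int) : Int × List (Int × Int) :=
  (st.1 - b.2.2, st.2 ++ [(st.1 - b.2.2, st.1)])

def get_block_indices_alt (blocks : List (String × Int × Int)) : List (Int × Int) :=
  let total := (blocks.map (·.2.2)).sum
  let st := blocks.reverse.foldl get_block_indices_alt_step (total, [])
  st.2.reverse

-- ===== PRECONDITION & SPEC =====
def Spec_get_block_indices (blocks : List (String × Int × Int)) (out : List (Int × Int)) : Prop := out = get_block_indices_alt blocks
instance (blocks : List (String × Int × Int)) (out : List (Int × Int)) : Decidable (Spec_get_block_indices blocks out) := by unfold Spec_get_block_indices; infer_instance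

-- ===== CLAIM (what is proved, stated in full; the proofs are below) =====
def Claim_equal_get_block_indices : Prop := ∀ (blocks : List (String × Int × Int)), Dom_get_block_indices blocks → Spec_get_block_indices blocks (get_block_indices blocks)

-- ===== LEMMAS AND PROOFS =====
-- the running total after the fold is the initial total minus the sum of processed counts
theorem alt_fold_fst (l : List (String × Int × Int)) (t : Int) (acc : List (Int × Int)) :
    (l.foldl get_block_indices_alt_step (t, acc)).1 = t - (l.map (·.2.2)).sum := by
  induction l generalizing t acc with
  | nil => simp
  | cons b rest ih => simp [get_block_indices_alt_step, ih]; ring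

-- B's backward fold started at t + sum, reversed, equals A's forward loop started at t
theorem alt_eq_go (blocks : List (String × Int × Int)) (t : Int) :
    ((blocks.reverse.foldl get_block_indices_alt_step (t + (blocks.map (·.2.2)).sum, [])).2).reverse
      = get_block_indices_go blocks t := by
  induction blocks generalizing t with
  | nil => simp [get_block_indices_go]
  | cons b rest ih =>
      simp only [List.reverse_cons, List.foldl_append, List.map_cons, List.sum_cons, get_block_indices_go]
      have hfst := alt_fold_fst rest.reverse (t + (b.2.2 + (rest.map (·.2.2)).sum)) ([] : List (Int × Int))
      have hsum : (rest.reverse.map (·.2.2)).sum = (rest.map (·.2.2)).sum := by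
        rw [List.map_reverse, List.sum_reverse]
      rw [hsum] at hfst
      set P := rest.reverse.foldl get_block_indices_alt_step (t + (b.2.2 + (rest.map (·.2.2)).sum), [])
      have h1 : P.1 = t + b.2.2 := by rw [hfst]; ring
      simp only [List.foldl_cons, List.foldl_nil, get_block_indices_alt_step, h1]
      have h2 : P.2.reverse = get_block_indices_go rest (t + b.2.2) := by
        have := ih (t + b.2.2)
        have harg : t + b.2.2 + (rest.map (·.2.2)).sum = t + (b.2.2 + (rest.map (·.2.2)).sum) := by ring
        rw [harg] at this
        exact this
      simp [h2]

-- ===== VERDICT (by name: the statement is the Claim_ definition above) =====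
theorem get_block_indices_spec : Claim_equal_get_block_indices := by
  intro blocks _
  unfold Spec_get_block_indices get_block_indices get_block_indices_alt
  have := alt_eq_go blocks 0
  rw [zero_add] at this
  simp only [← this]
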